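-- pv_equiv track=rewrite | github.com/marianesc/LP1 | time_campeao/time_campeao.py | time_campeao
-- ===== SOURCE A (Python) =====
-- def time_campeao(dados):
--     maior_pont = 0
--     for pontos in dados.values():
--         if pontos[0] >= maior_pont:
--             maior_pont = pontos[0]
--
--     times = []
--
--     for e in dados.items():
--         if e[1][0] == maior_pont:
--             times.append(e[0])
--
--     return times
-- ===== SOURCE B (Python) =====
-- def time_campeao(dados):
--     maior_pont = 0
--     times = []
--     for time, pontos in dados.items():
--         p = pontos[0]
--         if p > maior_pont:
--             maior_pont = p
--             times = [time]
--         elif p == maior_pont: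
--             times.append(time)
--     return times
-- ===== Notes on version B (the rewrite author's own statement) =====
-- stated objective: simpler
-- what changed: Replaced A's two separate passes (one over values() to find the maximum first score, one over items() to collect the teams having it) by a single pass over items() maintaining the running maximum and resetting/extending the champion list in place.
import Mathlib
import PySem

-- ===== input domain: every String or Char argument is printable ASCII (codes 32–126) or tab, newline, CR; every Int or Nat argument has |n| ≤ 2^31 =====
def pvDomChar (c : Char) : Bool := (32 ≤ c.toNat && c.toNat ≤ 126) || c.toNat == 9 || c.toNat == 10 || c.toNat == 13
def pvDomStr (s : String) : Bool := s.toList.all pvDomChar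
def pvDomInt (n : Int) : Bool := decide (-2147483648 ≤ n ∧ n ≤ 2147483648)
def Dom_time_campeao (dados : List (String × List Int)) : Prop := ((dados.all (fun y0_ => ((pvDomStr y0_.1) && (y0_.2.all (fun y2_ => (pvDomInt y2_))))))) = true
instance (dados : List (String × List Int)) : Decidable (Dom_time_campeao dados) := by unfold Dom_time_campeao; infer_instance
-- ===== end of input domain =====

-- B merges A's find-max and collect passes into one accumulator-maintaining pass (simpler, same cost).

-- pontos[0]: Python raises IndexError on an empty list; Pre_ excludes that, the .getD 0 branch is unreachable inside Pre_.
def pvFirst (pontos : List Int) : Int := (PySem.List.pyGet? pontos 0).getD 0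

-- ===== PORT A =====
def time_campeao (dados : List (String × List Int)) : List String :=
  let maior_pont : Int :=
    dados.foldl (fun maior_pont kv =>
      if pvFirst kv.2 ≥ maior_pont then pvFirst kv.2 else maior_pont) 0
  dados.foldl (fun times e =>
    if pvFirst e.2 = maior_pont then times ++ [e.1] else times) []

-- ===== PORT B =====
def time_campeao_alt (dados : List (String × List Int)) : List String :=
  (dados.foldl (fun (st : Int × List String) kv =>
      let p := pvFirst kv.2
      if p > st.1 then (p, [kv.1])
      else if p = st.1 then (st.1, st.2 ++ [kv.1])
      else st) (0, [])).2

-- ===== PRECONDITION & SPEC =====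
-- Pre_ excludes dicts in which some score list has no elements: there Python A raises IndexError on pontos[0].
def Pre_time_campeao (dados : List (String × List Int)) : Prop :=
  ∀ kv ∈ dados, kv.2 ≠ []
instance (dados : List (String × List Int)) : Decidable (Pre_time_campeao dados) := by
  unfold Pre_time_campeao; infer_instance
def pvWitness_time_campeao : (List (String × List Int)) :=
  [("a", [3]), ("b", [3, 1]), ("c", [2])]

def Spec_time_campeao (dados : List (String × List Int)) (out : List String) : Prop := out = time_campeao_alt dados
instance (dados : List (String × List Int)) (out : List String) : Decidable (Spec_time_campeao dados out) := by unfold Spec_time_campeao; infer_instance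

-- ===== CLAIM (what is proved, stated in full; the proofs are below) =====
def Claim_equal_time_campeao : Prop := ∀ (dados : List (String × List Int)), Dom_time_campeao dados → Pre_time_campeao dados → Spec_time_campeao dados (time_campeao dados)

-- ===== LEMMAS AND PROOFS =====

-- A's first loop, started from m.
def pvMax (m : Int) (xs : List (String × List Int)) : Int :=
  xs.foldl (fun maior kv => if pvFirst kv.2 ≥ maior then pvFirst kv.2 else maior) m

-- The teams whose first score equals M, in order.
def pvColl (M : Int) (xs : List (String × List Int)) : List String :=
  (xs.filter (fun kv => pvFirst kv.2 = M)).map Prod.fst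

lemma pvMax_le (xs : List (String × List Int)) : ∀ m : Int, m ≤ pvMax m xs := by
  induction xs with
  | nil => intro m; simp [pvMax]
  | cons kv rest ih =>
    intro m
    simp only [pvMax, List.foldl_cons]
    by_cases h : pvFirst kv.2 ≥ m
    · simp only [if_pos h]; exact le_trans h (ih _)
    · simp only [if_neg h]; exact ih m

lemma pvColl_cons (M : Int) (kv : String × List Int) (xs : List (String × List Int)) :
    pvColl M (kv :: xs) = (if pvFirst kv.2 = M then [kv.1] else []) ++ pvColl M xs := by
  by_cases h : pvFirst kv.2 = M <;> simp [pvColl, h]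

lemma collect_foldl (M : Int) (xs : List (String × List Int)) : ∀ ts : List String,
    xs.foldl (fun times e => if pvFirst e.2 = M then times ++ [e.1] else times) ts
      = ts ++ pvColl M xs := by
  induction xs with
  | nil => intro ts; simp [pvColl]
  | cons kv rest ih =>
    intro ts
    simp only [List.foldl_cons]
    by_cases h : pvFirst kv.2 = M
    · simp [ih, pvColl_cons, h]
    · simp [ih, pvColl_cons, h]

-- Invariant of B's single pass, relative to A's two passes.
lemma key (xs : List (String × List Int)) : ∀ (m : Int) (ts : List String),
    xs.foldl (fun (st : Int × List String) kv =>
        let p := pvFirst kv.2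
        if p > st.1 then (p, [kv.1])
        else if p = st.1 then (st.1, st.2 ++ [kv.1])
        else st) (m, ts)
      = (pvMax m xs, (if pvMax m xs = m then ts else []) ++ pvColl (pvMax m xs) xs) := by
  induction xs with
  | nil => intro m ts; simp [pvMax, pvColl]
  | cons kv rest ih =>
    intro m ts
    simp only [List.foldl_cons]
    by_cases hgt : pvFirst kv.2 > m
    · have hge : pvFirst kv.2 ≥ m := le_of_lt hgt
      have hM : pvMax m (kv :: rest) = pvMax (pvFirst kv.2) rest := by
        simp [pvMax, if_pos hge]
      simp only [if_pos hgt, ih, hM, pvColl_cons]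
      have hne : pvMax (pvFirst kv.2) rest ≠ m := by
        have := pvMax_le rest (pvFirst kv.2); omega
      rw [if_neg hne]
      by_cases he : pvMax (pvFirst kv.2) rest = pvFirst kv.2
      · simp [he]
      · have : ¬ pvFirst kv.2 = pvMax (pvFirst kv.2) rest := fun h => he h.symm
        simp [he, this]
    · by_cases heq : pvFirst kv.2 = m
      · have hM : pvMax m (kv :: rest) = pvMax m rest := by
          simp [pvMax, heq]
        simp only [if_neg hgt, if_pos heq, ih, hM, pvColl_cons]
        by_cases hm : pvMax m rest = m
        · simp [hm, heq]
        · have : ¬ pvFirst kv.2 = pvMax m rest := by rw [heq]; exact fun h => hm h.symm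
          simp [hm, this]
      · have hnge : ¬ pvFirst kv.2 ≥ m := by omega
        have hM : pvMax m (kv :: rest) = pvMax m rest := by
          simp [pvMax, if_neg hnge]
        have : ¬ pvFirst kv.2 = pvMax m rest := by
          have := pvMax_le rest m; omega
        simp only [if_neg hgt, if_neg heq, ih, hM, pvColl_cons, this, if_false]
        simp

-- ===== VERDICT (by name: the statement is the Claim_ definition above) =====
theorem time_campeao_spec : Claim_equal_time_campeao := by
  intro dados _ _
  unfold Spec_time_campeao time_campeao time_campeao_alt
  rw [key dados 0 []]
  simp only [collect_foldl]
  show [] ++ pvColl (pvMax 0 dados) dados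
      = (if pvMax 0 dados = 0 then ([] : List String) else []) ++ pvColl (pvMax 0 dados) dados
  by_cases h : pvMax 0 dados = 0 <;> simp [h]
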